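-- pv_equiv track=rewrite | github.com/neriahv/2Y1S_DSAL | dsal_labexam_codeMANINANG.py | negativess
-- ===== SOURCE A (Python) =====
-- def negativess(setss):
--     negatives = []
--     for i in setss:
--         if i < 0:
--             negatives.append(i)
--         else:
--             continue
--
--     for i in negatives:
--         setss.remove(i)
--
--     return setss
-- ===== SOURCE B (Python) =====
-- def negativess(setss):
--     k = 0
--     for x in setss:
--         if x >= 0:
--             setss[k] = x
--             k += 1
--     del setss[k:]
--     return setss
-- ===== Notes on version B (the rewrite author's own statement) =====
-- stated objective: faster
-- what changed: Replaced A's collect-negatives-then-remove-each-by-value (each remove is a linear scan) with a single in-place two-pointer compaction pass that keeps nonnegative elements.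
import Mathlib
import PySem

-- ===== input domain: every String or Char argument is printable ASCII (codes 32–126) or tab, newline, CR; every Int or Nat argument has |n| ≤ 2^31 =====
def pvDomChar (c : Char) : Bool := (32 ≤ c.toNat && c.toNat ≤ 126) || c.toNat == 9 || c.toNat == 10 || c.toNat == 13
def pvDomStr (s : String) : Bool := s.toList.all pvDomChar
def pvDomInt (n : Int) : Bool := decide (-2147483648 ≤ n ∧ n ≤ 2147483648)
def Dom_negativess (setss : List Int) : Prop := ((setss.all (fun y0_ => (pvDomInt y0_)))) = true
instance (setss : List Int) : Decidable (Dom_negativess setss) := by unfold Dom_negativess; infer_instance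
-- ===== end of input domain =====

-- B replaces A's collect-negatives-then-remove-each-by-value (quadratic) with a single
-- in-place compaction pass keeping nonnegative elements (linear); equivalence is about the
-- return value (both Pythons also mutate the argument list in place).


-- ===== PORT A =====
-- first loop: negatives.append(i) for i < 0; second loop: setss.remove(i) for each negative.
-- Python's list.remove raises only when the value is absent, which never happens here
-- (each negative occurrence was recorded exactly once), so the .getD fallback is dead code.
def negativess (setss : List Int) : List Int :=
  let negatives := setss.foldl (fun acc i => if i < 0 then acc ++ [i] else acc) []
  negatives.foldl (fun s i => (PySem.List.remove? s i).getD s) setss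

-- ===== PORT B =====
-- two-pointer compaction: the kept prefix (elements written at indices < k) is the result
-- after 'del setss[k:]'.
def negativess_alt (setss : List Int) : List Int :=
  setss.foldl (fun kept x => if 0 ≤ x then kept ++ [x] else kept) []

-- ===== PRECONDITION & SPEC =====
def Spec_negativess (setss : List Int) (out : List Int) : Prop := out = negativess_alt setss
instance (setss : List Int) (out : List Int) : Decidable (Spec_negativess setss out) := by unfold Spec_negativess; infer_instance

-- ===== CLAIM (what is proved, stated in full; the proofs are below) =====
def Claim_equal_negativess : Prop := ∀ (setss : List Int), Dom_negativess setss → Spec_negativess setss (negativess setss)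

-- ===== LEMMAS AND PROOFS =====
theorem pv_foldl_append_filter (p : Int → Bool) (s acc : List Int) :
    s.foldl (fun a x => if p x then a ++ [x] else a) acc = acc ++ s.filter p := by
  induction s generalizing acc with
  | nil => simp
  | cons x t ih =>
    by_cases h : p x <;> simp [List.foldl, h, ih]

theorem pv_b_alt_eq_filter (s : List Int) :
    negativess_alt s = s.filter (fun x => decide (0 ≤ x)) := by
  have := pv_foldl_append_filter (fun x => decide (0 ≤ x)) s []
  simpa [negativess_alt] using this

-- the remove loop skips a nonnegative head when every value to remove is negative
theorem pv_remove_skip (ns : List Int) (x : Int) (hx : 0 ≤ x) :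
    ∀ t : List Int, (∀ i ∈ ns, i < 0) →
      ns.foldl (fun s i => (PySem.List.remove? s i).getD s) (x :: t)
        = x :: ns.foldl (fun s i => (PySem.List.remove? s i).getD s) t := by
  induction ns with
  | nil => intro t _; simp
  | cons i ns' ih =>
    intro t hall
    have hix : x ≠ i := by
      have := hall i (by simp)
      omega
    have hstep : (PySem.List.remove? (x :: t) i).getD (x :: t)
        = x :: (PySem.List.remove? t i).getD t := by
      rw [PySem.List.remove?_cons_of_ne t hix]
      cases PySem.List.remove? t i <;> simp
    simp only [List.foldl, hstep]
    exact ih _ (fun j hj => hall j (by simp [hj]))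

theorem pv_a_eq_filter (s : List Int) :
    (s.filter (fun i => decide (i < 0))).foldl (fun s i => (PySem.List.remove? s i).getD s) s
      = s.filter (fun x => decide (0 ≤ x)) := by
  induction s with
  | nil => simp
  | cons x t ih =>
    by_cases hx : x < 0
    · have hns : ¬ (0 ≤ x) := by omega
      simp only [List.filter_cons, hx, decide_true, hns, decide_false, if_true,
        List.foldl, PySem.List.remove?_cons_self, Option.getD_some]
      exact ih
    · have hnx : 0 ≤ x := by omega
      have hall : ∀ i ∈ t.filter (fun i => decide (i < 0)), i < 0 := by
        intro i hi
        have := List.of_mem_filter hi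
        simpa using this
      simp only [List.filter_cons, hx, decide_false, Bool.false_eq_true, if_false]
      rw [pv_remove_skip _ x hnx t hall, ih]
      simp [hnx]

-- ===== VERDICT (by name: the statement is the Claim_ definition above) =====
theorem negativess_spec : Claim_equal_negativess := by
  intro setss _
  show negativess setss = negativess_alt setss
  have hneg : setss.foldl (fun acc i => if i < 0 then acc ++ [i] else acc) []
      = setss.filter (fun i => decide (i < 0)) := by
    have := pv_foldl_append_filter (fun i => decide (i < 0)) setss []
    simp only [List.nil_append] at this
    rw [← this]
    congr 1
    funext a x
    by_cases h : x < 0 <;> simp [h]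
  rw [negativess, pv_b_alt_eq_filter]
  simp only [hneg]
  exact pv_a_eq_filter setss
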